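-- pv_equiv track=rewrite | github.com/aryankix101/ai-labs | Crossword/crossword_placing_blocks.py | place_symmetrical_blocks
-- ===== SOURCE A (Python) =====
-- def place_symmetrical_blocks(board):
--     sym_blocks = set()
--     blocks = []
--     for i in range(len(board)):
--         if board[i]=="#":
--             blocks.append(i)
--     for b in blocks:
--         symmetrical_index = len(board) - (b+1)
--         if board[symmetrical_index]=='-':
--             sym_blocks.add(symmetrical_index)
--     for s in sym_blocks:
--         board[s] = "#"
--     return board
-- ===== SOURCE B (Python) =====
-- def place_symmetrical_blocks(board):
--     board[:] = ['#' if cell == '-' and mirror == '#' else cell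
--                 for cell, mirror in zip(board, reversed(board))]
--     return board
-- ===== Notes on version B (the rewrite author's own statement) =====
-- stated objective: simpler
-- what changed: Replaces A's three index-based passes (collect '#' indices, compute mirror indices into a set, write the set) with a pure elementwise construction: zip the board with its own reversal and map each (cell, mirror) pair to '#' when cell=='-' and mirror=='#', splicing the result back in place; no indices, no intermediate set, no writes interleaved with reads.
import Mathlib
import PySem

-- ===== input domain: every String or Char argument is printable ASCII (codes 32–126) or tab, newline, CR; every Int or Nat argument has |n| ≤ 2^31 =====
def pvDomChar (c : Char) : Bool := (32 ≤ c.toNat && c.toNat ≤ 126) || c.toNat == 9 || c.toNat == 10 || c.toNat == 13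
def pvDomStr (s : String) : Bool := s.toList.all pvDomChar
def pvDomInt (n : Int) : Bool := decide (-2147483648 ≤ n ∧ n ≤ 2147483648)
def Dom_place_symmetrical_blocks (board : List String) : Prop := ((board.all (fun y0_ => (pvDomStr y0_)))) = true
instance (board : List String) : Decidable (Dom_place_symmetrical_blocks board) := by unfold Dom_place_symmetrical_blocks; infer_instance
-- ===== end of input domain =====

-- B replaces A's three index-based passes (collect '#' indices, filter mirror indices into a
-- set, write the set) by a pure elementwise construction: zip the board with its own reversal
-- and map each (cell, mirror) pair — objective: simpler. Both Pythons mutate `board` in place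
-- to the same final contents (B splices via board[:] = …); the equivalence proved here is
-- about the return value.

-- ===== PORT A =====
-- range(len(board)) is ported as List.range; board[i] is ported as List.getD: every index read
-- (i < n, and len(board)-(b+1) with b < n) is in range, so Python never raises and getD is exact.
def place_symmetrical_blocks (board : List String) : List String :=
  let blocks : List Nat :=
    (List.range board.length).foldl
      (fun acc i => if board.getD i "" = "#" then acc ++ [i] else acc) []
  let sym_blocks : PySem.Set Nat :=
    blocks.foldl
      (fun s b =>
        let symmetrical_index := board.length - (b + 1)
        if board.getD symmetrical_index "" = "-" then PySem.Set.add s symmetrical_index else s)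
      PySem.Set.empty
  -- Python iterates the set in hash order; each iteration writes "#" at distinct indices, so
  -- the resulting list is independent of that order: we iterate in insertion order.
  sym_blocks.foldl (fun bd s => bd.set s "#") board

-- ===== PORT B =====
-- zip(board, reversed(board)) is ported as board.zip board.reverse; the comprehension as map.
def place_symmetrical_blocks_alt (board : List String) : List String :=
  (board.zip board.reverse).map (fun p => if p.1 = "-" ∧ p.2 = "#" then "#" else p.1)

-- ===== PRECONDITION & SPEC =====
def Spec_place_symmetrical_blocks (board : List String) (out : List String) : Prop := out = place_symmetrical_blocks_alt board
instance (board : List String) (out : List String) : Decidable (Spec_place_symmetrical_blocks board out) := by unfold Spec_place_symmetrical_blocks; infer_instance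

-- ===== CLAIM (what is proved, stated in full; the proofs are below) =====
def Claim_equal_place_symmetrical_blocks : Prop := ∀ (board : List String), Dom_place_symmetrical_blocks board → Spec_place_symmetrical_blocks board (place_symmetrical_blocks board)

-- ===== LEMMAS AND PROOFS =====

-- two lists are equal when their lengths agree and getD agrees everywhere
theorem pv_eq_of_len_getD {l₁ l₂ : List String} (h : l₁.length = l₂.length)
    (hg : ∀ k, l₁.getD k "" = l₂.getD k "") : l₁ = l₂ := by
  apply List.ext_getElem h
  intro i h1 h2
  have := hg i
  simpa [List.getD_eq_getElem?_getD, List.getElem?_eq_getElem, h1, h2] using this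

-- getD through a single set
theorem pv_getD_set (l : List String) (i j : Nat) (a : String) :
    (l.set i a).getD j "" = if i = j ∧ i < l.length then a else l.getD j "" := by
  rw [List.getD_eq_getElem?_getD, List.getD_eq_getElem?_getD, List.getElem?_set]
  by_cases h1 : i = j
  · subst h1
    by_cases h2 : i < l.length
    · simp [h2]
    · rw [if_pos rfl, if_neg h2, if_neg (fun hc => h2 hc.2)]
      rw [List.getElem?_eq_none (by omega)]
  · rw [if_neg h1, if_neg (fun hc => h1 hc.1)]

-- A's third pass: length and pointwise value
theorem pv_foldl_set_length (l : List Nat) (board : List String) :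
    (l.foldl (fun bd s => bd.set s "#") board).length = board.length := by
  induction l generalizing board with
  | nil => rfl
  | cons a t ih => simp [List.foldl_cons, ih]

theorem pv_foldl_set_getD (l : List Nat) (board : List String) (k : Nat) :
    (l.foldl (fun bd s => bd.set s "#") board).getD k "" =
      if k ∈ l ∧ k < board.length then "#" else board.getD k "" := by
  induction l generalizing board with
  | nil => simp
  | cons a t ih =>
    rw [List.foldl_cons, ih, pv_getD_set]
    simp only [List.length_set, List.mem_cons]
    split_ifs with h1 h2 h3 h4 h5 <;> simp_all <;> omega

-- A's second pass: membership of the mirror set (stated for the zeta-reduced loop body)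
theorem pv_mem_symfold (board : List String) (l : List Nat) (s : PySem.Set Nat) (k : Nat) :
    k ∈ l.foldl
        (fun s b =>
          if board.getD (board.length - (b + 1)) "" = "-" then
            PySem.Set.add s (board.length - (b + 1)) else s)
        s ↔
      k ∈ s ∨ ∃ b ∈ l, board.getD (board.length - (b + 1)) "" = "-" ∧ k = board.length - (b + 1) := by
  induction l generalizing s with
  | nil => simp
  | cons a t ih =>
    simp only [List.foldl_cons, List.mem_cons, exists_eq_or_imp]
    by_cases h : board.getD (board.length - (a + 1)) "" = "-"
    · rw [if_pos h, ih]
      simp only [PySem.Set.mem_add, h, true_and]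
      tauto
    · rw [if_neg h, ih]
      simp only [h, false_and, false_or]

-- A's first pass is a filter of the index range
theorem pv_blocks_eq (board : List String) :
    (List.range board.length).foldl
        (fun acc i => if board.getD i "" = "#" then acc ++ [i] else acc) [] =
      (List.range board.length).filter (fun i => board.getD i "" = "#") := by
  simpa using PySem.List.foldl_append_ite_eq_filter
    (l := List.range board.length) (acc := []) (p := fun i => board.getD i "" = "#")

-- pointwise characterisation of A's result
theorem pv_A_getD (board : List String) (k : Nat) :
    (place_symmetrical_blocks board).getD k "" =
      if k < board.length ∧ board.getD k "" = "-" ∧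
          board.getD (board.length - 1 - k) "" = "#" then "#" else board.getD k "" := by
  unfold place_symmetrical_blocks
  rw [pv_foldl_set_getD]
  have hmem : k ∈ (((List.range board.length).foldl
      (fun acc i => if board.getD i "" = "#" then acc ++ [i] else acc) []).foldl
      (fun s b =>
        if board.getD (board.length - (b + 1)) "" = "-" then
          PySem.Set.add s (board.length - (b + 1)) else s)
      PySem.Set.empty) ↔
      (k < board.length ∧ board.getD k "" = "-" ∧
        board.getD (board.length - 1 - k) "" = "#") := by
    rw [pv_mem_symfold, pv_blocks_eq]
    simp only [PySem.Set.empty, List.not_mem_nil, false_or, List.mem_filter,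
      List.mem_range, decide_eq_true_eq]
    constructor
    · rintro ⟨b, ⟨hb, hbv⟩, hm, rfl⟩
      refine ⟨by omega, hm, ?_⟩
      have hb' : board.length - 1 - (board.length - (b + 1)) = b := by omega
      rw [hb']; exact hbv
    · rintro ⟨hk, hm, hv⟩
      refine ⟨board.length - 1 - k, ⟨by omega, hv⟩, ?_, by omega⟩
      have hk' : board.length - (board.length - 1 - k + 1) = k := by omega
      rw [hk']; exact hm
  split_ifs with h1 h2 h2
  · rfl
  · exact absurd (hmem.mp h1.1) h2
  · exact absurd ⟨hmem.mpr h2, h2.1⟩ h1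
  · rfl

theorem pv_A_length (board : List String) :
    (place_symmetrical_blocks board).length = board.length := by
  unfold place_symmetrical_blocks
  exact pv_foldl_set_length _ _

-- B's result, pointwise
theorem pv_B_length (board : List String) :
    (place_symmetrical_blocks_alt board).length = board.length := by
  simp [place_symmetrical_blocks_alt]

theorem pv_B_getD (board : List String) (k : Nat) :
    (place_symmetrical_blocks_alt board).getD k "" =
      if k < board.length ∧ board.getD k "" = "-" ∧
          board.getD (board.length - 1 - k) "" = "#" then "#" else board.getD k "" := by
  unfold place_symmetrical_blocks_alt
  by_cases hk : k < board.length
  · have hk' : board.length - 1 - k < board.length := by omega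
    have hz : k < (board.zip board.reverse).length := by
      simp [List.length_zip, hk]
    rw [List.getD_eq_getElem?_getD, List.getElem?_map,
      List.getElem?_eq_getElem hz, Option.map_some]
    have hzk : (board.zip board.reverse)[k] =
        (board[k]'hk, board[board.length - 1 - k]'hk') := by
      rw [List.getElem_zip]
      congr 1
      rw [List.getElem_reverse]
    rw [hzk]
    simp only [Option.getD_some]
    rw [List.getD_eq_getElem?_getD (l := board) (i := k),
      List.getElem?_eq_getElem hk]
    rw [List.getD_eq_getElem?_getD (l := board) (i := board.length - 1 - k),
      List.getElem?_eq_getElem hk']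
    simp only [Option.getD_some, hk, true_and]
  · have h1 : (board.zip board.reverse).length ≤ k := by
      simp [List.length_zip]; omega
    rw [List.getD_eq_getElem?_getD, List.getElem?_eq_none (by simpa using h1)]
    rw [List.getD_eq_getElem?_getD (l := board), List.getElem?_eq_none (by omega)]
    simp [hk]

-- ===== VERDICT (by name: the statement is the Claim_ definition above) =====
theorem place_symmetrical_blocks_spec : Claim_equal_place_symmetrical_blocks := by
  intro board _
  unfold Spec_place_symmetrical_blocks
  refine pv_eq_of_len_getD (by rw [pv_A_length, pv_B_length]) (fun k => ?_)
  rw [pv_A_getD, pv_B_getD]
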